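-- pv_equiv track=rewrite | github.com/deth2jt/compsec01 | ass1.py | foo
-- ===== SOURCE A (Python) =====
-- def foo(set1,set2,set3):
--     #count = 0
--     foobar = ""
--
--     while not (len(set1) == 0 and len(set2) == 0 and len(set3) == 0):
--
--
--         if len(set1) == 0 and len(set2) == 0 and len(set3) != 0:
--             foobar +=  set3[0]
--
--         elif len(set1) == 0 and len(set2) != 0 and len(set3) != 0:
--             foobar += set2[0]+ set3[0]
--
--         elif len(set1) != 0 and len(set2) == 0 and len(set3) != 0:
--             foobar += set1[0]+ set3[0]
--
--         elif len(set1) != 0 and len(set2) != 0 and len(set3) == 0: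
--             foobar += set1[0]+ set2[0]
--
--         elif len(set1) != 0 and len(set2) == 0 and len(set3) == 0:
--             foobar += set1[0]
--
--         elif len(set1) == 0 and len(set2) != 0 and len(set3) == 0:
--             foobar += set2[0]
--         else:
--             foobar += set1[0]+ set2[0]+set3[0]
--
--         set1 = set1[1:]
--         set2 = set2[1:]
--         set3 = set3[1:]
--
--         #count = count + 1
--     return foobar
-- ===== SOURCE B (Python) =====
-- def foo(set1, set2, set3):
--     n = max(len(set1), len(set2), len(set3))
--     return ''.join(set1[i:i+1] + set2[i:i+1] + set3[i:i+1] for i in range(n))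
-- ===== Notes on version B (the rewrite author's own statement) =====
-- stated objective: faster
-- what changed: Replaces A's while-loop over seven emptiness-case branches with repeated whole-string re-slicing (set = set[1:] each iteration, quadratic) by a single indexed join: n = max of the three lengths, then ''.join of the one-character slices s[i:i+1] for i in range(n).
import Mathlib
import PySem

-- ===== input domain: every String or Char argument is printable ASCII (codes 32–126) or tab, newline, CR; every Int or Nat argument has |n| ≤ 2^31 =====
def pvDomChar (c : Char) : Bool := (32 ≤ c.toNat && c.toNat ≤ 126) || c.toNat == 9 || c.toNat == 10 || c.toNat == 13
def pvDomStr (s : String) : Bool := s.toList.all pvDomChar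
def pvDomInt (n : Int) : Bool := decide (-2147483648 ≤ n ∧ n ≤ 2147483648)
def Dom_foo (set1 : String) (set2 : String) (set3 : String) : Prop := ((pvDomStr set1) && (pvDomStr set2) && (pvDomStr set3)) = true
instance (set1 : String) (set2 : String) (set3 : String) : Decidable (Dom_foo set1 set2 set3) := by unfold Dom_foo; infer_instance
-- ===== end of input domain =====

-- B replaces A's while-loop with seven emptiness branches and repeated slicing by a single
-- indexed join over one-character slices, avoiding A's quadratic re-slicing (objective: faster).

-- ===== PORT A =====
-- A's while loop: strings as their character lists, foobar the accumulator.
def fooLoop (fuel : Nat) (s1 s2 s3 acc : List Char) : List Char :=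
  match fuel with
  | 0 => acc  -- fuel = total length at the call site: never reached before the loop condition fails
  | fuel + 1 =>
    if s1.length = 0 ∧ s2.length = 0 ∧ s3.length = 0 then acc
    else
      let acc' :=
        if s1.length = 0 ∧ s2.length = 0 ∧ s3.length ≠ 0 then acc ++ [s3.headI]
        else if s1.length = 0 ∧ s2.length ≠ 0 ∧ s3.length ≠ 0 then acc ++ [s2.headI, s3.headI]
        else if s1.length ≠ 0 ∧ s2.length = 0 ∧ s3.length ≠ 0 then acc ++ [s1.headI, s3.headI]
        else if s1.length ≠ 0 ∧ s2.length ≠ 0 ∧ s3.length = 0 then acc ++ [s1.headI, s2.headI]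
        else if s1.length ≠ 0 ∧ s2.length = 0 ∧ s3.length = 0 then acc ++ [s1.headI]
        else if s1.length = 0 ∧ s2.length ≠ 0 ∧ s3.length = 0 then acc ++ [s2.headI]
        else acc ++ [s1.headI, s2.headI, s3.headI]
      fooLoop fuel s1.tail s2.tail s3.tail acc'

def foo (set1 : String) (set2 : String) (set3 : String) : String :=
  String.ofList (fooLoop (set1.toList.length + set2.toList.length + set3.toList.length) set1.toList set2.toList set3.toList [])

-- ===== PORT B =====
-- n = max(len(set1), len(set2), len(set3)); ''.join(set1[i:i+1]+set2[i:i+1]+set3[i:i+1] for i in range(n))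
def foo_alt (set1 : String) (set2 : String) (set3 : String) : String :=
  let l1 := set1.toList
  let l2 := set2.toList
  let l3 := set3.toList
  let n := max (max l1.length l2.length) l3.length
  String.ofList (((List.range n).map (fun (i : Nat) =>
    PySem.List.slice l1 (some (i : Int)) (some ((i : Int) + 1)) ++
    PySem.List.slice l2 (some (i : Int)) (some ((i : Int) + 1)) ++
    PySem.List.slice l3 (some (i : Int)) (some ((i : Int) + 1)))).flatten)

-- ===== PRECONDITION & SPEC =====
def Spec_foo (set1 : String) (set2 : String) (set3 : String) (out : String) : Prop := out = foo_alt set1 set2 set3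
instance (set1 : String) (set2 : String) (set3 : String) (out : String) : Decidable (Spec_foo set1 set2 set3 out) := by unfold Spec_foo; infer_instance

-- ===== CLAIM (what is proved, stated in full; the proofs are below) =====
def Claim_equal_foo : Prop := ∀ (set1 : String) (set2 : String) (set3 : String), Dom_foo set1 set2 set3 → Spec_foo set1 set2 set3 (foo set1 set2 set3)

-- ===== LEMMAS AND PROOFS =====

-- pure interleave recursion, intermediate between the two ports
def ileave (s1 s2 s3 : List Char) : List Char :=
  if s1.length = 0 ∧ s2.length = 0 ∧ s3.length = 0 then []
  else (s1.take 1 ++ s2.take 1 ++ s3.take 1) ++ ileave s1.tail s2.tail s3.tail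
termination_by s1.length + s2.length + s3.length
decreasing_by
  simp only [List.length_tail]; omega

lemma fooLoop_eq_ileave (fuel : Nat) : ∀ (s1 s2 s3 acc : List Char),
    s1.length + s2.length + s3.length ≤ fuel →
    fooLoop fuel s1 s2 s3 acc = acc ++ ileave s1 s2 s3 := by
  induction fuel with
  | zero =>
    intro s1 s2 s3 acc h
    have h1 : s1.length = 0 ∧ s2.length = 0 ∧ s3.length = 0 := by omega
    rw [fooLoop, ileave, if_pos h1, List.append_nil]
  | succ n ih =>
    intro s1 s2 s3 acc h
    by_cases h1 : s1.length = 0 ∧ s2.length = 0 ∧ s3.length = 0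
    · rw [fooLoop, ileave, if_pos h1, if_pos h1, List.append_nil]
    · rw [fooLoop, ileave, if_neg h1, if_neg h1]
      rw [ih _ _ _ _ (by simp only [List.length_tail]; omega)]
      rcases s1 with _ | ⟨a, s1⟩ <;> rcases s2 with _ | ⟨b, s2⟩ <;> rcases s3 with _ | ⟨c, s3⟩ <;>
        simp at h1 ⊢

lemma ileave_eq_core (m : Nat) : ∀ (s1 s2 s3 : List Char),
    max (max s1.length s2.length) s3.length = m →
    ileave s1 s2 s3 = ((List.range m).map (fun i =>
      (s1.drop i).take 1 ++ (s2.drop i).take 1 ++ (s3.drop i).take 1)).flatten := by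
  induction m with
  | zero =>
    intro s1 s2 s3 h
    simp only [Nat.max_eq_zero_iff] at h
    rw [ileave, if_pos ⟨h.1.1, h.1.2, h.2⟩]
    simp
  | succ m ih =>
    intro s1 s2 s3 h
    rw [ileave]
    have hne : ¬(s1.length = 0 ∧ s2.length = 0 ∧ s3.length = 0) := by omega
    rw [if_neg hne]
    have htail : max (max s1.tail.length s2.tail.length) s3.tail.length = m := by
      simp only [List.length_tail]; omega
    rw [ih _ _ _ htail, List.range_succ_eq_map]
    rw [List.map_cons, List.map_map, List.flatten_cons]
    refine congrArg₂ _ (by simp) (congrArg _ (List.map_congr_left ?_))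
    intro i _
    simp [Nat.succ_eq_add_one, ← List.tail_drop, List.drop_tail]

lemma slice_one (l : List Char) (i : Nat) :
    PySem.List.slice l (some (i : Int)) (some ((i : Int) + 1)) = (l.drop i).take 1 := by
  have h1 : ((i : Int) + 1) = ((i : Int) + ((1 : Nat) : Int)) := by norm_num
  rw [h1, PySem.List.slice_natCast_add]

theorem foo_spec : Claim_equal_foo := by
  intro set1 set2 set3 _
  unfold Spec_foo foo foo_alt
  simp only [slice_one]
  rw [fooLoop_eq_ileave _ _ _ _ _ le_rfl, List.nil_append,
    ileave_eq_core (max (max set1.toList.length set2.toList.length) set3.toList.length)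
      set1.toList set2.toList set3.toList rfl]
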